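-- pv_equiv track=rewrite | github.com/Pupiera/ParseBrain | parsebrain/utils/get_result_per_corpus.py | split_data_per_corpus
-- ===== SOURCE A (Python) =====
-- def split_data_per_corpus(data):
--     """
--     @return: A dict of dict where each key is one corpus and each corpus is a dict of key sent_id and a list of line.
--     """
--     res = {}
--     for k, item in data.items():
--         splitted = k.split("-")
--         corpus = splitted[1]
--         if corpus in res:
--             res[corpus][k] = item
--         else:
--             res[corpus] = {}
--             res[corpus][k] = item
--     return res
-- ===== SOURCE B (Python) =====
-- def split_data_per_corpus(data):
--     """
--     @return: A dict of dict where each key is one corpus and each corpus is a dict of key sent_id and a list of line.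
--     """
--     corpora = list(dict.fromkeys(k.split("-")[1] for k in data))
--     return {c: {k: v for k, v in data.items() if k.split("-")[1] == c}
--             for c in corpora}
-- ===== Notes on version B (the rewrite author's own statement) =====
-- stated objective: alternative
-- what changed: Replaces A's streaming insert-or-create nested-dict loop with a two-pass scheme: first collect the distinct corpora in order of first appearance (dict.fromkeys), then build each corpus's inner dict by a filtering comprehension over the data.
import Mathlib
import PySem

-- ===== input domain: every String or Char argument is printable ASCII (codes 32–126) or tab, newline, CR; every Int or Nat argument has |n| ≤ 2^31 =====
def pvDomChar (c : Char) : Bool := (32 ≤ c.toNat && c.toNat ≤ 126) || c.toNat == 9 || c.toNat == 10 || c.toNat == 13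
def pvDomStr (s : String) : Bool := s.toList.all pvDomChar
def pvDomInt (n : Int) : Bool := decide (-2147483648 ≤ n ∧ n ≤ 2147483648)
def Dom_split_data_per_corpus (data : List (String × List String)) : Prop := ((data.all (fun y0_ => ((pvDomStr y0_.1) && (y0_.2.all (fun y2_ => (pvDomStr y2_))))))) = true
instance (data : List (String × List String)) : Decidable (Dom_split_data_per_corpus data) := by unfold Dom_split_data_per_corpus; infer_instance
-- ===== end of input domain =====

-- B groups by a first pass collecting the distinct corpora in order, then a filtering pass per corpus:
-- a different decomposition of A's streaming insert-or-create loop (objective: alternative, not faster).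

-- k.split("-")[1]; the .getD fallbacks are unreachable inside Pre_ ("-" is a nonempty separator,
-- and every key contains "-", so index 1 exists; outside Pre_ Python raises IndexError).
def pvCorpus (k : String) : String :=
  (PySem.List.pyGet? ((PySem.Str.split? k "-").getD []) 1).getD ""

-- ===== PORT A =====
def split_data_per_corpus (data : List (String × List String)) : List (String × List (String × List String)) :=
  let res : PySem.Dict String (PySem.Dict String (List String)) :=
    data.foldl (fun res kv =>
      let corpus := pvCorpus kv.1
      if res.contains corpus then
        res.insert corpus ((res.getD corpus PySem.Dict.empty).insert kv.1 kv.2)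
      else
        let res1 := res.insert corpus PySem.Dict.empty
        res1.insert corpus ((res1.getD corpus PySem.Dict.empty).insert kv.1 kv.2))
      PySem.Dict.empty
  res.items.map (fun p => (p.1, p.2.items))

-- ===== PORT B =====
def split_data_per_corpus_alt (data : List (String × List String)) : List (String × List (String × List String)) :=
  let corpora := PySem.List.dedup (data.map (fun kv => pvCorpus kv.1))
  corpora.map (fun c =>
    (c, (PySem.Dict.ofList (data.filter (fun kv => pvCorpus kv.1 == c))).items))

-- ===== PRECONDITION & SPEC =====
-- A raises IndexError on any key without "-" (split gives a single piece, index 1 is out of range).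
def Pre_split_data_per_corpus (data : List (String × List String)) : Prop :=
  (data.all (fun kv => kv.1.toList.contains '-')) = true
instance (data : List (String × List String)) : Decidable (Pre_split_data_per_corpus data) := by
  unfold Pre_split_data_per_corpus; infer_instance

def pvWitness_split_data_per_corpus : (List (String × List String)) :=
  [("ab-cd", ["x y"]), ("e-f", [])]

def Spec_split_data_per_corpus (data : List (String × List String)) (out : List (String × List (String × List String))) : Prop := out = split_data_per_corpus_alt data
instance (data : List (String × List String)) (out : List (String × List (String × List String))) : Decidable (Spec_split_data_per_corpus data out) := by unfold Spec_split_data_per_corpus; infer_instance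

-- ===== CLAIM (what is proved, stated in full; the proofs are below) =====
def Claim_equal_split_data_per_corpus : Prop := ∀ (data : List (String × List String)), Dom_split_data_per_corpus data → Pre_split_data_per_corpus data → Spec_split_data_per_corpus data (split_data_per_corpus data)

-- ===== LEMMAS AND PROOFS =====

-- A's loop body, with the insert-empty-then-insert else branch collapsed.
def pvStep (res : PySem.Dict String (PySem.Dict String (List String))) (kv : String × List String) :
    PySem.Dict String (PySem.Dict String (List String)) :=
  res.insert (pvCorpus kv.1) ((res.getD (pvCorpus kv.1) PySem.Dict.empty).insert kv.1 kv.2)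

theorem pvStep_eq (res : PySem.Dict String (PySem.Dict String (List String))) (kv : String × List String) :
    (let corpus := pvCorpus kv.1;
     if res.contains corpus then
       res.insert corpus ((res.getD corpus PySem.Dict.empty).insert kv.1 kv.2)
     else
       let res1 := res.insert corpus PySem.Dict.empty
       res1.insert corpus ((res1.getD corpus PySem.Dict.empty).insert kv.1 kv.2)) = pvStep res kv := by
  by_cases h : res.contains (pvCorpus kv.1)
  · simp [h, pvStep]
  · have h' : res.contains (pvCorpus kv.1) = false := by simpa using h
    have e : res.getD (pvCorpus kv.1) PySem.Dict.empty = PySem.Dict.empty :=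
      PySem.Dict.getD_of_not_contains _ _ h'
    simp only [pvStep, h', Bool.false_eq_true, if_false]
    rw [PySem.Dict.getD_insert_self, PySem.Dict.insert_insert_self, e]

theorem pvGetD_loop (l : List (String × List String)) (d : PySem.Dict String (PySem.Dict String (List String)))
    (c : String) :
    (l.foldl pvStep d).getD c PySem.Dict.empty =
      (l.filter (fun kv => pvCorpus kv.1 == c)).foldl
        (fun inner kv => inner.insert kv.1 kv.2) (d.getD c PySem.Dict.empty) := by
  induction l generalizing d with
  | nil => rfl
  | cons kv t ih =>
    simp only [List.foldl_cons, List.filter_cons]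
    by_cases hc : pvCorpus kv.1 = c
    · simp only [hc, beq_self_eq_true, if_true, List.foldl_cons]
      rw [ih, pvStep, hc, PySem.Dict.getD_insert_self]
    · have hc' : ¬ (c = pvCorpus kv.1) := fun h => hc h.symm
      have hb : (pvCorpus kv.1 == c) = false := by simp [hc]
      rw [hb]
      simp only [Bool.false_eq_true, if_false]
      rw [ih]
      simp [pvStep, PySem.Dict.getD_insert, hc']

theorem split_data_per_corpus_eq_alt (data : List (String × List String)) :
    split_data_per_corpus data = split_data_per_corpus_alt data := by
  unfold split_data_per_corpus split_data_per_corpus_alt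
  have hbody : (fun (res : PySem.Dict String (PySem.Dict String (List String))) (kv : String × List String) =>
      let corpus := pvCorpus kv.1;
      if res.contains corpus then
        res.insert corpus ((res.getD corpus PySem.Dict.empty).insert kv.1 kv.2)
      else
        let res1 := res.insert corpus PySem.Dict.empty
        res1.insert corpus ((res1.getD corpus PySem.Dict.empty).insert kv.1 kv.2)) = pvStep := by
    funext res kv; exact pvStep_eq res kv
  rw [hbody]
  show List.map (fun p => (p.1, p.2.items)) (data.foldl pvStep PySem.Dict.empty).items
     = List.map (fun c => (c, (PySem.Dict.ofList (data.filter (fun kv => pvCorpus kv.1 == c))).items))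
         (PySem.List.dedup (data.map (fun kv => pvCorpus kv.1)))
  have hnd : (data.foldl pvStep PySem.Dict.empty).keys.Nodup := by
    exact PySem.Dict.nodup_keys_foldl_insert_key data (fun kv => pvCorpus kv.1)
      (fun d kv => (d.getD (pvCorpus kv.1) PySem.Dict.empty).insert kv.1 kv.2)
      PySem.Dict.empty (by simp)
  have hkeys : (data.foldl pvStep PySem.Dict.empty).keys
      = PySem.List.dedup (data.map (fun kv => pvCorpus kv.1)) := by
    rw [show (data.foldl pvStep PySem.Dict.empty).keys
        = PySem.Set.update (PySem.Dict.empty : PySem.Dict String (PySem.Dict String (List String))).keys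
            (data.map (fun kv => pvCorpus kv.1)) from
      PySem.Dict.keys_foldl_insert_key data (fun kv => pvCorpus kv.1) _ _]
    simp [PySem.Set.update_nil_left, PySem.List.dedup_eq_ofList, PySem.Dict.keys_empty]
  rw [PySem.Dict.items_eq_map_keys _ hnd PySem.Dict.empty, List.map_map, hkeys]
  refine List.map_congr_left (fun c _ => ?_)
  simp only [Function.comp]
  rw [pvGetD_loop data PySem.Dict.empty c, PySem.Dict.getD_empty]
  rfl

-- ===== VERDICT (by name: the statement is the Claim_ definition above) =====
theorem split_data_per_corpus_spec : Claim_equal_split_data_per_corpus := by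
  intro data _ _
  unfold Spec_split_data_per_corpus
  exact split_data_per_corpus_eq_alt data
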